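-- pv_equiv track=rewrite | github.com/AmirDonyadide/nl2map-generalization | src/eval/labels.py | build_name_lut
-- ===== SOURCE A (Python) =====
-- from typing import Dict, Sequence
--
-- def _norm_name(x: str) -> str:
--     return str(x).strip().lower()
--
-- def build_name_lut(src_names: Sequence[str], dst_names: Sequence[str]) -> Dict[int, int]:
--     """
--     Build a lookup table mapping:
--       src_index (position in src_names) -> dst_index (position in dst_names)
--     """
--     src = [_norm_name(x) for x in src_names]
--     dst = [_norm_name(x) for x in dst_names]
--     dst_pos = {name: j for j, name in enumerate(dst)}
--
--     lut: Dict[int, int] = {}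
--     for i, s in enumerate(src):
--         j = dst_pos.get(s)
--         if j is not None:
--             lut[i] = j
--     return lut
-- ===== SOURCE B (Python) =====
-- def build_name_lut(src_names, dst_names):
--     index = {}
--     for i, x in enumerate(src_names):
--         index.setdefault(x.strip().lower(), []).append(i)
--     last = {}
--     for j, y in enumerate(dst_names):
--         last[y.strip().lower()] = j
--     lut = {}
--     for name, j in last.items():
--         for i in index.get(name, []):
--             lut[i] = j
--     return {i: lut[i] for i in range(len(src_names)) if i in lut}
-- ===== Notes on version B (the rewrite author's own statement) =====
-- stated objective: alternative
-- what changed: B replaces A's per-src-index probe of the last-position dict by a hash join: it builds an inverted index from each normalized src name to all its src indices, joins it once per distinct dst name against the last-position dict, and emits the result in src-index order.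
import Mathlib
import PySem

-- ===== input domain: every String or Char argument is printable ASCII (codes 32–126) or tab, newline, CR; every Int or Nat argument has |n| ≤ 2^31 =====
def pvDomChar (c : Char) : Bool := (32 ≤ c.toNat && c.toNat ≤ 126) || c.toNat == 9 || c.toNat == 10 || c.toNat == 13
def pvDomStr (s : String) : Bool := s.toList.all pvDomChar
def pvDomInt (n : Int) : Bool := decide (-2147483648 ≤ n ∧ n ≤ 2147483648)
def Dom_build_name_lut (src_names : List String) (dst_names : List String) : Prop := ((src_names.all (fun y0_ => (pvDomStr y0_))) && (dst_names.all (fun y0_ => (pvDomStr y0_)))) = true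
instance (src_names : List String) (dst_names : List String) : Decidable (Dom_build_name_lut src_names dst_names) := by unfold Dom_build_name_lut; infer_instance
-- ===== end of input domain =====

-- B replaces A's per-src-index probe of the last-position dict by a hash join: an inverted
-- index from each normalized src name to its src indices, joined once per distinct dst name,
-- the result emitted in src-index order (objective: alternative, same cost).

-- ===== PORT A =====
-- _norm_name(x) = str(x).strip().lower()
def pvNorm (x : String) : String := PySem.Str.lower (PySem.Str.strip x)

def build_name_lut (src_names : List String) (dst_names : List String) : List (Int × Int) :=
  let src := src_names.map pvNorm
  let dst := dst_names.map pvNorm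
  let dst_pos : PySem.Dict String Int :=
    (PySem.List.enumerate dst 0).foldl (fun d p => d.insert p.2 p.1) PySem.Dict.empty
  let lut : PySem.Dict Int Int :=
    (PySem.List.enumerate src 0).foldl (fun lut p =>
      match dst_pos.get? p.2 with
      | some j => lut.insert p.1 j
      | none   => lut) PySem.Dict.empty
  lut.items

-- ===== PORT B =====
def build_name_lut_alt (src_names : List String) (dst_names : List String) : List (Int × Int) :=
  let index : PySem.Dict String (List Int) :=
    (PySem.List.enumerate src_names 0).foldl
      (fun d p => d.modify (pvNorm p.2) [] (fun l => l ++ [p.1])) PySem.Dict.empty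
  let last : PySem.Dict String Int :=
    (PySem.List.enumerate dst_names 0).foldl
      (fun d q => d.insert (pvNorm q.2) q.1) PySem.Dict.empty
  let lut : PySem.Dict Int Int :=
    last.items.foldl
      (fun h q => (index.getD q.1 []).foldl (fun h i => h.insert i q.2) h) PySem.Dict.empty
  (PySem.List.pyRange 0 src_names.length 1).filterMap
    (fun i => if lut.contains i then some (i, lut.getD i 0) else none)

-- ===== PRECONDITION & SPEC =====
def Spec_build_name_lut (src_names : List String) (dst_names : List String) (out : List (Int × Int)) : Prop := out = build_name_lut_alt src_names dst_names
instance (src_names : List String) (dst_names : List String) (out : List (Int × Int)) : Decidable (Spec_build_name_lut src_names dst_names out) := by unfold Spec_build_name_lut; infer_instance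

-- ===== CLAIM (what is proved, stated in full; the proofs are below) =====
def Claim_equal_build_name_lut : Prop := ∀ (src_names : List String) (dst_names : List String), Dom_build_name_lut src_names dst_names → Spec_build_name_lut src_names dst_names (build_name_lut src_names dst_names)

-- ===== LEMMAS AND PROOFS =====

-- common form: last dst position carrying a given normalized name
def pvLast (dst_names : List String) (s : String) : Option Int :=
  (PySem.List.enumerate dst_names 0).foldl (fun a q => if pvNorm q.2 = s then some q.1 else a) none

def pvCanon (src_names dst_names : List String) : List (Int × Int) :=
  (PySem.List.enumerate src_names 0).filterMap
    (fun p => (pvLast dst_names (pvNorm p.2)).map (fun j => (p.1, j)))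

-- enumerate commutes with map on the element part
theorem pv_enumerate_map {α β : Type} (f : α → β) (xs : List α) (s : Int) :
    PySem.List.enumerate (xs.map f) s = (PySem.List.enumerate xs s).map (fun p => (p.1, f p.2)) := by
  induction xs generalizing s with
  | nil => rfl
  | cons x xs ih => simp [PySem.List.enumerate_cons, ih]

-- A's dst_pos dict: lookup = last position with that name
theorem pv_get?_last (l : List (Int × String)) (d : PySem.Dict String Int) (s : String) :
    ((l.foldl (fun d p => d.insert p.2 p.1) d).get? s)
      = l.foldl (fun a p => if p.2 == s then some p.1 else a) (d.get? s) := by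
  induction l generalizing d with
  | nil => rfl
  | cons p rest ih =>
    simp only [List.foldl_cons]
    rw [ih]
    by_cases h : p.2 = s
    · subst h; simp [PySem.Dict.get?_insert_self]
    · rw [PySem.Dict.get?_insert_of_ne _ _ (fun hs => h hs.symm)]
      simp [h]

-- A's lut loop over fresh distinct keys appends the matched pairs
theorem pv_items_foldl_insert_opt (dpos : PySem.Dict String Int) :
    ∀ (l : List (Int × String)) (d : PySem.Dict Int Int),
      (∀ p ∈ l, d.contains p.1 = false) → (l.map (·.1)).Nodup →
      (l.foldl (fun lut p => match dpos.get? p.2 with | some j => lut.insert p.1 j | none => lut) d).items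
        = d.items ++ l.filterMap (fun p => (dpos.get? p.2).map (fun j => (p.1, j))) := by
  intro l
  induction l with
  | nil => intro d _ _; simp
  | cons p rest ih =>
    intro d hfresh hnd
    simp only [List.foldl_cons, List.filterMap_cons]
    cases hf : dpos.get? p.2 with
    | none =>
      simp only [Option.map_none]
      rw [ih d (fun q hq => hfresh q (List.mem_cons_of_mem _ hq)) (by simpa using hnd.of_cons)]
    | some j =>
      simp only [Option.map_some]
      rw [ih (d.insert p.1 j) ?_ (by simpa using hnd.of_cons)]
      · rw [PySem.Dict.items_insert_of_not_contains _ j (hfresh p List.mem_cons_self)]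
        simp
      · intro q hq
        rw [PySem.Dict.contains_insert]
        have h1 : q.1 ≠ p.1 := by
          simp only [List.map_cons, List.nodup_cons] at hnd
          intro he
          exact hnd.1 (he ▸ List.mem_map_of_mem hq)
        simp [h1, hfresh q (List.mem_cons_of_mem _ hq)]

-- fold of inserts of the same value: last-write-wins by membership
theorem pv_get?_insert_const (j : Int) :
    ∀ (lst : List Int) (h : PySem.Dict Int Int) (x : Int),
      (lst.foldl (fun h i => h.insert i j) h).get? x = if x ∈ lst then some j else h.get? x := by
  intro lst
  induction lst with
  | nil => intro h x; simp
  | cons i rest ih =>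
    intro h x
    simp only [List.foldl_cons]
    rw [ih, PySem.Dict.get?_insert]
    by_cases hm : x ∈ rest
    · simp [hm]
    · by_cases he : x = i <;> simp [hm, he]

-- B's join loop: lookup = last (name, j) pair whose bucket contains x
theorem pv_get?_join (index : PySem.Dict String (List Int)) :
    ∀ (l : List (String × Int)) (h : PySem.Dict Int Int) (x : Int),
      ((l.foldl (fun h q => (index.getD q.1 []).foldl (fun h i => h.insert i q.2) h) h).get? x)
        = l.foldl (fun a q => if x ∈ index.getD q.1 [] then some q.2 else a) (h.get? x) := by
  intro l
  induction l with
  | nil => intro h x; rfl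
  | cons q rest ih =>
    intro h x
    simp only [List.foldl_cons]
    rw [ih, pv_get?_insert_const]

-- B's last dict: lookup = last position with that normalized name
theorem pv_get?_last' (l : List (Int × String)) (d : PySem.Dict String Int) (s : String) :
    ((l.foldl (fun d q => d.insert (pvNorm q.2) q.1) d).get? s)
      = l.foldl (fun a q => if pvNorm q.2 = s then some q.1 else a) (d.get? s) := by
  induction l generalizing d with
  | nil => rfl
  | cons q rest ih =>
    simp only [List.foldl_cons]
    rw [ih]
    by_cases h : pvNorm q.2 = s
    · subst h; simp [PySem.Dict.get?_insert_self]
    · rw [PySem.Dict.get?_insert_of_ne _ _ (fun hs => h hs.symm)]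
      simp [h]

-- a fold over an assoc list with distinct keys picks the unique match = Dict.get?
theorem pv_fold_no_match (s0 : String) :
    ∀ (l : List (String × Int)) (a : Option Int), s0 ∉ l.map (·.1) →
      l.foldl (fun a q => if q.1 = s0 then some q.2 else a) a = a := by
  intro l
  induction l with
  | nil => intro a _; rfl
  | cons q rest ih =>
    intro a hnm
    simp only [List.map_cons, List.mem_cons] at hnm
    rw [not_or] at hnm
    simp only [List.foldl_cons, if_neg (fun h : q.1 = s0 => hnm.1 h.symm)]
    exact ih a hnm.2

theorem pv_fold_items_first (s0 : String) :
    ∀ (l : List (String × Int)), (l.map (·.1)).Nodup →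
      l.foldl (fun a q => if q.1 = s0 then some q.2 else a) none = (PySem.Dict.mk l).get? s0 := by
  intro l
  induction l with
  | nil => intro _; rfl
  | cons q rest ih =>
    intro hnd
    simp only [List.map_cons, List.nodup_cons] at hnd
    rw [List.foldl_cons, PySem.Dict.get?_mk_cons]
    by_cases h : q.1 = s0
    · rw [if_pos h, if_pos (by simp [h])]
      exact pv_fold_no_match s0 rest (some q.2) (h ▸ hnd.1)
    · rw [if_neg h, if_neg (by simp [h])]
      exact ih hnd.2

theorem pv_get?_via_items (d : PySem.Dict String Int) (hnd : d.keys.Nodup) (s0 : String) :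
    d.items.foldl (fun a q => if q.1 = s0 then some q.2 else a) none = d.get? s0 := by
  obtain ⟨l⟩ := d
  exact pv_fold_items_first s0 l hnd

-- membership in B's inverted-index bucket
theorem pv_mem_bucket (src_names : List String) (k : Nat) (hk : k < src_names.length) (s : String) :
    ((k : Int) ∈ (((PySem.List.enumerate src_names 0).map (fun p => (pvNorm p.2, p.1))).filter
        (fun p => p.1 == s)).map (·.2)) ↔ s = pvNorm src_names[k] := by
  simp only [List.mem_map, List.mem_filter, List.mem_map, PySem.List.mem_enumerate_iff, beq_iff_eq]
  constructor
  · rintro ⟨a, ⟨⟨p, ⟨m, hm, rfl⟩, rfl⟩, hs⟩, hq⟩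
    have hmk : m = k := by
      have : (m : Int) = (k : Int) := by simpa using hq
      exact_mod_cast this
    subst hmk
    simpa using hs.symm
  · intro hs
    refine ⟨(pvNorm src_names[k], 0 + (k : Int)),
      ⟨⟨(0 + (k : Int), src_names[k]), ⟨k, hk, rfl⟩, rfl⟩, hs.symm⟩, by simp⟩

-- option helper: B's comprehension entry is a map over the lookup
theorem pv_entry_eq (o : Option Int) (i : Int) :
    (if o.isSome then some (i, o.getD 0) else none) = o.map (fun j => (i, j)) := by
  cases o <;> rfl

theorem pvCanon_eq_range (src_names dst_names : List String) :
    pvCanon src_names dst_names = (PySem.List.pyRange 0 src_names.length 1).filterMap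
      (fun i => (pvLast dst_names (pvNorm (PySem.List.pyGetD src_names i ""))).map (fun j => (i, j))) := by
  unfold pvCanon
  rw [PySem.List.enumerate_eq_map_pyRange src_names "", List.filterMap_map]
  simp [Function.comp, PySem.List.len_eq]

theorem pv_A_eq_canon (src_names dst_names : List String) :
    build_name_lut src_names dst_names = pvCanon src_names dst_names := by
  simp only [build_name_lut]
  rw [pv_items_foldl_insert_opt]
  · rw [show (PySem.Dict.empty : PySem.Dict Int Int).items = [] from rfl, List.nil_append]
    rw [pv_enumerate_map pvNorm src_names 0, List.filterMap_map]
    unfold pvCanon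
    apply List.filterMap_congr
    intro p _
    simp only [Function.comp_apply]
    congr 1
    rw [pv_get?_last, PySem.Dict.get?_empty]
    rw [pv_enumerate_map pvNorm dst_names 0, List.foldl_map]
    unfold pvLast
    simp only [beq_iff_eq]
  · intro p _; exact PySem.Dict.contains_empty p.1
  · rw [PySem.List.map_fst_enumerate]
    exact PySem.List.nodup_pyRange_one _ _

theorem pv_B_eq_canon (src_names dst_names : List String) :
    build_name_lut_alt src_names dst_names = pvCanon src_names dst_names := by
  simp only [build_name_lut_alt]
  rw [pvCanon_eq_range]
  apply List.filterMap_congr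
  intro i hi
  rw [PySem.List.mem_pyRange_one] at hi
  obtain ⟨h0, hlt⟩ := hi
  have hk : i.toNat < src_names.length := by omega
  have hik : i = (i.toNat : Int) := by omega
  rw [PySem.Dict.contains_eq_isSome_get?, PySem.Dict.getD_eq_get?_getD, pv_entry_eq]
  congr 1
  rw [pv_get?_join, PySem.Dict.get?_empty]
  have hidx : ∀ s : String,
      ((PySem.List.enumerate src_names 0).foldl
        (fun d p => d.modify (pvNorm p.2) [] (fun l => l ++ [p.1])) PySem.Dict.empty).getD s []
      = (((PySem.List.enumerate src_names 0).map (fun p => (pvNorm p.2, p.1))).filter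
          (fun p => p.1 == s)).map (·.2) := by
    intro s
    have hstep : (List.foldl (fun d p => d.modify (pvNorm p.2) [] fun l => l ++ [p.1])
          (PySem.Dict.empty : PySem.Dict String (List Int)) (PySem.List.enumerate src_names 0))
        = List.foldl (fun d (pr : String × Int) => d.modify pr.1 [] fun l => l ++ [pr.2])
            PySem.Dict.empty ((PySem.List.enumerate src_names 0).map (fun p => (pvNorm p.2, p.1))) := by
      rw [List.foldl_map]
    rw [hstep, PySem.Dict.getD_foldl_modify_append]
    simp [PySem.Dict.getD_empty]
  simp only [hidx]
  rw [hik]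
  simp only [pv_mem_bucket src_names i.toNat hk]
  have hget : PySem.List.pyGetD src_names ((i.toNat : Nat) : Int) "" = src_names[i.toNat] := by
    rw [PySem.List.pyGetD_of_nonneg _ _ (Int.natCast_nonneg _)]
    simp only [Int.toNat_natCast]
    exact List.getD_eq_getElem _ _ hk
  rw [hget]
  have hnd : ((PySem.List.enumerate dst_names 0).foldl
      (fun d q => d.insert (pvNorm q.2) q.1)
      (PySem.Dict.empty : PySem.Dict String Int)).keys.Nodup :=
    PySem.Dict.nodup_keys_foldl_insert_key _ (fun q : Int × String => pvNorm q.2)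
      (fun _ q => q.1) _ (by simp [PySem.Dict.keys_empty])
  rw [pv_get?_via_items _ hnd, pv_get?_last', PySem.Dict.get?_empty]
  unfold pvLast
  rfl

-- ===== VERDICT (by name: the statement is the Claim_ definition above) =====
theorem build_name_lut_spec : Claim_equal_build_name_lut := by
  intro src_names dst_names _
  unfold Spec_build_name_lut
  rw [pv_A_eq_canon, pv_B_eq_canon]
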